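-- pv_equiv track=rewrite | github.com/raeez/chiral-bar-cobar | compute/lib/cy_shadow_tower_k3e_engine.py | eta_power_coeffs
-- ===== SOURCE A (Python) =====
-- from typing import Any, Dict, List, Optional, Tuple
--
-- def eta_coeffs(nmax: int) -> List[int]:
--     r"""Coefficients of prod_{n>=1}(1-q^n) = sum c[n] q^n.
--
--     eta(tau) = q^{1/24} * sum c[n] q^n  (AP46).
--     """
--     coeffs = [0] * nmax
--     for k in range(-nmax, nmax + 1):
--         idx = k * (3 * k - 1) // 2
--         if 0 <= idx < nmax:
--             coeffs[idx] += (-1) ** k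
--     return coeffs
--
-- def eta_power_coeffs(nmax: int, power: int) -> List[int]:
--     r"""Coefficients of (prod(1-q^n))^power."""
--     if power == 0:
--         c = [0] * nmax
--         c[0] = 1
--         return c
--
--     def _convolve_int(a, b, nm):
--         result = [0] * nm
--         for i in range(min(len(a), nm)):
--             if a[i] == 0:
--                 continue
--             for j in range(min(len(b), nm - i)):
--                 result[i + j] += a[i] * b[j]
--         return result
--
--     if power > 0:
--         result = [0] * nmax
--         result[0] = 1
--         base = eta_coeffs(nmax)
--         for _ in range(power):
--             result = _convolve_int(result, base, nmax)
--         return result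
--     else:
--         # eta^{-|p|} via partition function convolution
--         _eta_inv = [0] * nmax
--         _eta_inv[0] = 1
--         for n in range(1, nmax):
--             s = 0
--             for kk in range(1, n + 1):
--                 p1 = kk * (3 * kk - 1) // 2
--                 p2 = kk * (3 * kk + 1) // 2
--                 if p1 > n:
--                     break
--                 sign = (-1) ** (kk + 1)
--                 s += sign * _eta_inv[n - p1]
--                 if p2 <= n:
--                     s += sign * _eta_inv[n - p2]
--             _eta_inv[n] = s
--
--         result = [0] * nmax
--         result[0] = 1
--         for _ in range(abs(power)):
--             result = _convolve_int(result, _eta_inv, nmax)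
--         return result
-- ===== SOURCE B (Python) =====
-- def eta_power_coeffs(nmax: int, power: int):
--     """Coefficients of (prod(1-q^n))^power, via the logarithmic-derivative
--     recurrence F'*B = power*F*B' with B = prod(1-q^n) sparse (pentagonal)."""
--     f = [0] * nmax
--     f[0] = 1
--     if power == 0:
--         return f
--     # sparse nonzero terms (index, coefficient) of B = prod(1-q^n), ascending
--     pent = []
--     k = 1
--     while k * (3 * k - 1) // 2 < nmax:
--         sign = -1 if k % 2 else 1
--         pent.append((k * (3 * k - 1) // 2, sign))
--         p2 = k * (3 * k + 1) // 2
--         if p2 < nmax: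
--             pent.append((p2, sign))
--         k += 1
--     for n in range(1, nmax):
--         s = 0
--         for j, c in pent:
--             if j > n:
--                 break
--             s += c * ((power + 1) * j - n) * f[n - j]
--         f[n] = s // n
--     return f
-- ===== Notes on version B (the rewrite author's own statement) =====
-- stated objective: faster
-- what changed: A builds the coefficient table by repeated O(nmax^2) integer convolutions (|power| of them, plus an O(nmax^1.5) partition recurrence for negative power); B never convolves: it computes the coefficients of F = B^power directly from the logarithmic-derivative recurrence F'*B = power*F*B', using only the O(sqrt(nmax)) nonzero pentagonal terms of B = prod(1-q^n), one exact division per coefficient.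
-- outside the precondition, e.g. on eta_power_coeffs(8, 2): A returns [1, -2, -1.0, 2.0, 1.0, 2.0, -2.0, 0.0], B returns [1, -2, -1, 2, 1, 2, -2, 0]; on eta_power_coeffs(0, 1): A raises IndexError, B raises IndexError
import Mathlib
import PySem

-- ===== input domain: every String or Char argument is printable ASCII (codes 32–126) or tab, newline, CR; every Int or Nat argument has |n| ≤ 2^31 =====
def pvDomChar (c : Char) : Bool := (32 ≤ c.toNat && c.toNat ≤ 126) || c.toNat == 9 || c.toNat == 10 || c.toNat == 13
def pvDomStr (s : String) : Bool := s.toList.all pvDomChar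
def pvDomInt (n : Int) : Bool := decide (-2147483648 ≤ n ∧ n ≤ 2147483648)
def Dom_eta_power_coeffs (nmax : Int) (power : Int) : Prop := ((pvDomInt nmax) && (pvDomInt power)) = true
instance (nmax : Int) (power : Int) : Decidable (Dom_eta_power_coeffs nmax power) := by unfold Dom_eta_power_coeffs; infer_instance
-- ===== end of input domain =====

-- B replaces A's repeated O(nmax^2) series convolutions by the logarithmic-derivative recurrence
-- F'·B = power·F·B' over the sparse pentagonal terms of B = prod(1-q^n)  (objective: faster).

-- ===== PORT A =====
-- helper eta_coeffs (Python eta_coeffs). Python's `(-1)**k` is an int for k ≥ 0 but a FLOAT of the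
-- same value for k < 0; it is ported as the integer (-1)^|k|.  (Those float contributions only reach
-- the returned list outside Pre_, where nothing is claimed.)
def pvEtaCoeffs (nmax : Int) : List Int :=
  (PySem.List.pyRange (-nmax) (nmax+1) 1).foldl
    (fun coeffs k =>
      let idx := PySem.Int.floordiv (k*(3*k-1)) 2
      if 0 ≤ idx ∧ idx < nmax then
        PySem.List.pySetD coeffs idx (PySem.List.pyGetD coeffs idx 0 + (-1)^k.natAbs)
      else coeffs)
    (List.replicate nmax.toNat (0:Int))

-- helper _convolve_int
def pvConvolveInt (a b : List Int) (nm : Int) : List Int :=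
  (PySem.List.pyRange 0 (min (a.length:Int) nm) 1).foldl
    (fun result i =>
      if PySem.List.pyGetD a i 0 = 0 then result
      else
        (PySem.List.pyRange 0 (min (b.length:Int) (nm - i)) 1).foldl
          (fun result j =>
            PySem.List.pySetD result (i+j)
              (PySem.List.pyGetD result (i+j) 0 + PySem.List.pyGetD a i 0 * PySem.List.pyGetD b j 0))
          result)
    (List.replicate nm.toNat (0:Int))

-- inner `for kk in range(1, n+1): … if p1 > n: break …` of the negative branch (early exit = return s)
def pvInvInner (inv : List Int) (n : Int) : List Int → Int → Int
  | [], s => s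
  | kk :: rest, s =>
    let p1 := PySem.Int.floordiv (kk*(3*kk-1)) 2
    let p2 := PySem.Int.floordiv (kk*(3*kk+1)) 2
    if p1 > n then s
    else
      let sign : Int := (-1)^(kk+1).natAbs   -- (-1)**(kk+1), an int since kk ≥ 1 here
      let s1 := s + sign * PySem.List.pyGetD inv (n - p1) 0
      let s2 := if p2 ≤ n then s1 + sign * PySem.List.pyGetD inv (n - p2) 0 else s1
      pvInvInner inv n rest s2

def eta_power_coeffs (nmax : Int) (power : Int) : List Int :=
  if power = 0 then
    -- Python `c[0] = 1` raises IndexError when nmax ≤ 0 (excluded by Pre_); pySetD is a no-op there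
    PySem.List.pySetD (List.replicate nmax.toNat (0:Int)) 0 1
  else if power > 0 then
    let result := PySem.List.pySetD (List.replicate nmax.toNat (0:Int)) 0 1
    let base := pvEtaCoeffs nmax
    (List.range power.toNat).foldl (fun result _ => pvConvolveInt result base nmax) result
  else
    let etaInv0 := PySem.List.pySetD (List.replicate nmax.toNat (0:Int)) 0 1
    let etaInv := (PySem.List.pyRange 1 nmax 1).foldl
      (fun inv n => PySem.List.pySetD inv n (pvInvInner inv n (PySem.List.pyRange 1 (n+1) 1) 0))
      etaInv0
    let result := PySem.List.pySetD (List.replicate nmax.toNat (0:Int)) 0 1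
    (List.range power.natAbs).foldl (fun result _ => pvConvolveInt result etaInv nmax) result

-- ===== PORT B =====
-- sparse pentagonal term list of B = prod(1-q^n); the Python `while` loop advances k while
-- k(3k-1)/2 < nmax, which halts by k = nmax (k(3k-1)/2 ≥ k for k ≥ 1), so fuel nmax.toNat+1 is exact
def pvBuildPent (nmax : Int) : Int → Nat → List (Int × Int)
  | _, 0 => []
  | k, fuel+1 =>
    if PySem.Int.floordiv (k*(3*k-1)) 2 < nmax then
      let sign : Int := if PySem.Int.mod k 2 = 0 then 1 else -1   -- `-1 if k % 2 else 1`
      let p2 := PySem.Int.floordiv (k*(3*k+1)) 2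
      (PySem.Int.floordiv (k*(3*k-1)) 2, sign) ::
        ((if p2 < nmax then [(p2, sign)] else []) ++ pvBuildPent nmax (k+1) fuel)
    else []

-- inner `for j, c in pent: if j > n: break; s += …` (early exit = return s)
def pvBSum (f : List Int) (pw n : Int) : List (Int × Int) → Int → Int
  | [], s => s
  | (j, c) :: rest, s =>
    if j > n then s
    else pvBSum f pw n rest (s + c * ((pw+1)*j - n) * PySem.List.pyGetD f (n-j) 0)

def eta_power_coeffs_alt (nmax : Int) (power : Int) : List Int :=
  let f := PySem.List.pySetD (List.replicate nmax.toNat (0:Int)) 0 1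
  if power = 0 then f
  else
    let pent := pvBuildPent nmax 1 (nmax.toNat+1)
    (PySem.List.pyRange 1 nmax 1).foldl
      (fun f n => PySem.List.pySetD f n (PySem.Int.floordiv (pvBSum f power n pent 0) n)) f

-- ===== PRECONDITION & SPEC =====
-- Pre_ excludes (a) nmax ≤ 0, where Python A raises IndexError (`c[0] = 1` / `result[0] = 1` on an
-- empty list), and (b) power ≥ 1 with nmax ≥ 3, where A returns a list containing FLOATS
-- ((-1)**k with k < 0 is a float), i.e. not a value of the declared type list[int].
def Pre_eta_power_coeffs (nmax : Int) (power : Int) : Prop := 1 ≤ nmax ∧ (power ≤ 0 ∨ nmax ≤ 2)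
instance (nmax : Int) (power : Int) : Decidable (Pre_eta_power_coeffs nmax power) := by
  unfold Pre_eta_power_coeffs; infer_instance
def pvWitness_eta_power_coeffs : Int × Int := (6, -2)

def Spec_eta_power_coeffs (nmax : Int) (power : Int) (out : List Int) : Prop := out = eta_power_coeffs_alt nmax power
instance (nmax : Int) (power : Int) (out : List Int) : Decidable (Spec_eta_power_coeffs nmax power out) := by unfold Spec_eta_power_coeffs; infer_instance

-- ===== CLAIM (what is proved, stated in full; the proofs are below) =====
def Claim_equal_eta_power_coeffs : Prop := ∀ (nmax : Int) (power : Int), Dom_eta_power_coeffs nmax power → Pre_eta_power_coeffs nmax power → Spec_eta_power_coeffs nmax power (eta_power_coeffs nmax power)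

-- ===== LEMMAS AND PROOFS =====


def pvSgn (k : ℤ) : ℤ := if k % 2 = 0 then 1 else -1
noncomputable def pvPentB (j : ℕ) : ℤ :=
  ∑ k ∈ Finset.Icc (-(j:ℤ)) ((j:ℤ)+1), if k*(3*k-1) = 2*(j:ℤ) then pvSgn k else 0
def pvP1 (k : ℤ) : ℤ := k*(3*k-1)/2
def pvP2 (k : ℤ) : ℤ := k*(3*k+1)/2

lemma pvP1_two_mul (k : ℤ) : 2 * pvP1 k = k*(3*k-1) := by
  obtain ⟨t, ht⟩ : ∃ t, k*(3*k-1) = 2*t := by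
    rcases Int.even_or_odd k with ⟨t,ht⟩|⟨t,ht⟩
    · exact ⟨t*(3*k-1), by rw [ht]; ring⟩
    · exact ⟨k*(3*t+1), by rw [ht]; ring⟩
  unfold pvP1; omega

lemma pvP2_two_mul (k : ℤ) : 2 * pvP2 k = k*(3*k+1) := by
  obtain ⟨t, ht⟩ : ∃ t, k*(3*k+1) = 2*t := by
    rcases Int.even_or_odd k with ⟨t,ht⟩|⟨t,ht⟩
    · exact ⟨t*(3*k+1), by rw [ht]; ring⟩
    · exact ⟨k*(3*t+2), by rw [ht]; ring⟩
  unfold pvP2; omega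

lemma pvP1_neg (k : ℤ) : pvP1 (-k) = pvP2 k := by
  have h1 := pvP1_two_mul (-k); have h2 := pvP2_two_mul k; nlinarith [h1, h2]

lemma pvSgn_neg (k : ℤ) : pvSgn (-k) = pvSgn k := by
  unfold pvSgn; split_ifs with h1 h2 h2 <;> omega

lemma pvP1_ge (k : ℤ) (hk : 1 ≤ k) : k ≤ pvP1 k := by
  have := pvP1_two_mul k; nlinarith

lemma pvP2_ge (k : ℤ) (hk : 1 ≤ k) : k ≤ pvP2 k := by
  have := pvP2_two_mul k; nlinarith

lemma pvP1_le_P2 (k : ℤ) (hk : 0 ≤ k) : pvP1 k ≤ pvP2 k := by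
  have := pvP1_two_mul k; have := pvP2_two_mul k; nlinarith

lemma pvP1_mono {a k : ℤ} (ha : 1 ≤ a) (h : a ≤ k) : pvP1 a ≤ pvP1 k := by
  have := pvP1_two_mul a; have := pvP1_two_mul k; nlinarith

lemma pvP1_pos (k : ℤ) (hk : 1 ≤ k) : 1 ≤ pvP1 k := le_trans hk (pvP1_ge k hk)

lemma pent_bound {k : ℤ} {j : ℕ} (h : k*(3*k-1) = 2*(j:ℤ)) : -(j:ℤ) ≤ k ∧ k ≤ (j:ℤ)+1 := by
  constructor
  · by_contra hc; push_neg at hc; nlinarith [Int.natCast_nonneg j]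
  · by_contra hc; push_neg at hc; nlinarith [Int.natCast_nonneg j]

-- extend the interval in pvPentB
lemma pvPentB_ext (j N : ℕ) (hj : j ≤ N) :
    pvPentB j = ∑ k ∈ Finset.Icc (-(N:ℤ)) ((N:ℤ)+1), if k*(3*k-1) = 2*(j:ℤ) then pvSgn k else 0 := by
  unfold pvPentB
  refine Finset.sum_subset ?_ ?_
  · intro k hk; simp only [Finset.mem_Icc] at *; omega
  · intro k _ hk; simp only [Finset.mem_Icc] at hk
    split_ifs with h
    · exact absurd (pent_bound h) (by omega)
    · rfl

-- the sum-exchange: a pentagonal-weighted j-sum is a two-guard k-sum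
lemma pvS (N : ℕ) (h : ℕ → ℤ) :
    ∑ j ∈ Finset.range N, pvPentB (j+1) * h (j+1)
      = ∑ k ∈ Finset.Icc (1:ℤ) (N:ℤ), pvSgn k *
          ((if pvP1 k ≤ (N:ℤ) then h (pvP1 k).toNat else 0)
            + (if pvP2 k ≤ (N:ℤ) then h (pvP2 k).toNat else 0)) := by
  -- step 1: widen each pvPentB interval and push `h` inside
  have step1 : ∑ j ∈ Finset.range N, pvPentB (j+1) * h (j+1)
      = ∑ j ∈ Finset.range N, ∑ k ∈ Finset.Icc (-(N:ℤ)) ((N:ℤ)+1),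
          (if k*(3*k-1) = 2*((j:ℤ)+1) then pvSgn k * h (j+1) else 0) := by
    refine Finset.sum_congr rfl fun j hj => ?_
    rw [pvPentB_ext (j+1) N (by simpa using Finset.mem_range.mp hj), Finset.sum_mul]
    refine Finset.sum_congr rfl fun k _ => ?_
    push_cast
    split_ifs <;> simp
  -- step 2: swap and evaluate the inner j-sum (at most one j matches)
  have step2 : ∀ k : ℤ, ∑ j ∈ Finset.range N,
        (if k*(3*k-1) = 2*((j:ℤ)+1) then pvSgn k * h (j+1) else 0)
      = (if 1 ≤ pvP1 k ∧ pvP1 k ≤ (N:ℤ) then pvSgn k * h (pvP1 k).toNat else 0) := by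
    intro k
    have h2 := pvP1_two_mul k
    by_cases hc : 1 ≤ pvP1 k ∧ pvP1 k ≤ (N:ℤ)
    · rw [if_pos hc]
      have hmem : (pvP1 k).toNat - 1 ∈ Finset.range N := by
        refine Finset.mem_range.mpr ?_; omega
      rw [Finset.sum_eq_single_of_mem _ hmem]
      · rw [if_pos (by push_cast; omega), (by omega : (pvP1 k).toNat - 1 + 1 = (pvP1 k).toNat)]
      · intro j _ hj
        rw [if_neg]; push_cast; omega
    · rw [if_neg hc]
      refine Finset.sum_eq_zero fun j hj => ?_
      have := Finset.mem_range.mp hj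
      rw [if_neg]; push_cast; omega
  rw [step1, Finset.sum_comm]
  simp only [step2]
  -- step 3: split the k-interval at 0
  have hsplit : Finset.Icc (-(N:ℤ)) ((N:ℤ)+1)
      = Finset.Icc (-(N:ℤ)) 0 ∪ Finset.Icc (1:ℤ) ((N:ℤ)+1) := by
    ext a; simp only [Finset.mem_Icc, Finset.mem_union]; omega
  have hdisj : Disjoint (Finset.Icc (-(N:ℤ)) 0) (Finset.Icc (1:ℤ) ((N:ℤ)+1)) := by
    rw [Finset.disjoint_left]; intro a ha hb
    simp only [Finset.mem_Icc] at *; omega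
  rw [hsplit, Finset.sum_union hdisj]
  -- negative part: reindex k ↦ -k, giving the P2-guards
  have hneg : ∑ k ∈ Finset.Icc (-(N:ℤ)) 0,
        (if 1 ≤ pvP1 k ∧ pvP1 k ≤ (N:ℤ) then pvSgn k * h (pvP1 k).toNat else 0)
      = ∑ k ∈ Finset.Icc (1:ℤ) (N:ℤ),
          (if pvP2 k ≤ (N:ℤ) then pvSgn k * h (pvP2 k).toNat else 0) := by
    rw [show Finset.Icc (-(N:ℤ)) 0 = (Finset.Icc (0:ℤ) (N:ℤ)).image (fun x => -x) by
      ext a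
      simp only [Finset.mem_Icc, Finset.mem_image]
      constructor
      · intro ha; exact ⟨-a, by omega, by omega⟩
      · rintro ⟨x, hx, rfl⟩; omega]
    rw [Finset.sum_image (by intro a _ b _ hab; simp only [neg_inj] at hab; exact hab)]
    rw [show Finset.Icc (0:ℤ) (N:ℤ) = insert 0 (Finset.Icc (1:ℤ) (N:ℤ)) by
      ext a; simp [Finset.mem_Icc]; omega]
    rw [Finset.sum_insert (by simp)]
    have h00 : pvP1 (-(0:ℤ)) = 0 := by have := pvP1_two_mul (-(0:ℤ)); omega
    have hz : (if 1 ≤ pvP1 (-(0:ℤ)) ∧ pvP1 (-(0:ℤ)) ≤ (N:ℤ) then pvSgn (-(0:ℤ)) * h (pvP1 (-(0:ℤ))).toNat else 0) = 0 := by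
      have hneg0 : ¬(1 ≤ pvP1 (-(0:ℤ)) ∧ pvP1 (-(0:ℤ)) ≤ (N:ℤ)) := by omega
      rw [if_neg hneg0]
    rw [hz, zero_add]
    refine Finset.sum_congr rfl fun k hk => ?_
    have hk1 : 1 ≤ k := (Finset.mem_Icc.mp hk).1
    rw [pvP1_neg, pvSgn_neg]
    have : 1 ≤ pvP2 k := le_trans hk1 (pvP2_ge k hk1)
    by_cases hle : pvP2 k ≤ (N:ℤ)
    · rw [if_pos ⟨this, hle⟩, if_pos hle]
    · rw [if_neg (by omega), if_neg hle]
  -- positive part: drop k = N+1 (pvP1 too big) and the trivial lower guard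
  have hpos : ∑ k ∈ Finset.Icc (1:ℤ) ((N:ℤ)+1),
        (if 1 ≤ pvP1 k ∧ pvP1 k ≤ (N:ℤ) then pvSgn k * h (pvP1 k).toNat else 0)
      = ∑ k ∈ Finset.Icc (1:ℤ) (N:ℤ),
          (if pvP1 k ≤ (N:ℤ) then pvSgn k * h (pvP1 k).toNat else 0) := by
    have hsub : Finset.Icc (1:ℤ) (N:ℤ) ⊆ Finset.Icc (1:ℤ) ((N:ℤ)+1) := by
      intro a ha; simp only [Finset.mem_Icc] at *; omega
    refine ((Finset.sum_subset hsub ?_).symm).trans ?_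
    · intro k hk hk2
      simp only [Finset.mem_Icc] at hk hk2
      have hge := pvP1_ge k (by omega)
      have hcond : ¬(1 ≤ pvP1 k ∧ pvP1 k ≤ (N:ℤ)) := by omega
      rw [if_neg hcond]
    · refine Finset.sum_congr rfl fun k hk => ?_
      have hk1 : 1 ≤ k := (Finset.mem_Icc.mp hk).1
      have := pvP1_pos k hk1
      by_cases hle : pvP1 k ≤ (N:ℤ)
      · rw [if_pos ⟨this, hle⟩, if_pos hle]
      · rw [if_neg (by omega), if_neg hle]
  rw [hneg, hpos, ← Finset.sum_add_distrib]
  refine Finset.sum_congr rfl fun k _ => ?_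
  simp only [mul_add, mul_ite, mul_zero]
  exact add_comm _ _

-- ===== partition inverse and power series =====
noncomputable def pvPinv : ℕ → ℤ
  | 0 => 1
  | (n+1) => -∑ j ∈ Finset.range (n+1), pvPentB (j+1) * pvPinv (n - j)
decreasing_by omega

lemma pvPinv_zero : pvPinv 0 = 1 := by rw [pvPinv]

lemma pvPinv_succ (n : ℕ) :
    pvPinv (n+1) = -∑ j ∈ Finset.range (n+1), pvPentB (j+1) * pvPinv (n - j) := by
  rw [pvPinv]

noncomputable def pvBser : PowerSeries ℤ := PowerSeries.mk fun n => pvPentB n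
noncomputable def pvPser : PowerSeries ℤ := PowerSeries.mk fun n => pvPinv n

lemma pvPentB_zero : pvPentB 0 = 1 := by decide

lemma coeff_mul_range (F G : PowerSeries ℤ) (n : ℕ) :
    PowerSeries.coeff n (F * G)
      = ∑ i ∈ Finset.range (n+1), PowerSeries.coeff i F * PowerSeries.coeff (n-i) G := by
  rw [PowerSeries.coeff_mul, Finset.Nat.sum_antidiagonal_eq_sum_range_succ_mk]

lemma pvBP_one : pvBser * pvPser = 1 := by
  ext n
  rw [coeff_mul_range]
  cases n with
  | zero =>
    simp [pvBser, pvPser, pvPentB_zero, pvPinv_zero]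
  | succ n =>
    rw [Finset.sum_range_succ']
    simp only [pvBser, pvPser, PowerSeries.coeff_mk, pvPentB_zero, Nat.sub_zero, one_mul]
    rw [show ∑ i ∈ Finset.range (n+1), pvPentB (i+1) * pvPinv (n+1-(i+1))
          = ∑ i ∈ Finset.range (n+1), pvPentB (i+1) * pvPinv (n-i) from
        Finset.sum_congr rfl fun i hi => by
          have := Finset.mem_range.mp hi
          rw [show n+1-(i+1) = n-i by omega]]
    rw [pvPinv_succ]
    simp [PowerSeries.coeff_one]

-- ===== logarithmic-derivative identity for pvPser ^ m =====
lemma pv_dPB : pvBser * PowerSeries.derivativeFun pvPser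
    + pvPser * PowerSeries.derivativeFun pvBser = 0 := by
  have h := PowerSeries.derivativeFun_mul pvBser pvPser
  rw [pvBP_one, PowerSeries.derivativeFun_one] at h
  simp only [smul_eq_mul] at h
  exact h.symm

lemma pv_dP_mul_B : PowerSeries.derivativeFun pvPser * pvBser
    = -(pvPser * PowerSeries.derivativeFun pvBser) := by
  have h := pv_dPB
  have : pvBser * PowerSeries.derivativeFun pvPser
      = -(pvPser * PowerSeries.derivativeFun pvBser) := by linear_combination h
  rw [← this]; ring

lemma pv_dpow (m : ℕ) : PowerSeries.derivativeFun (pvPser ^ m) * pvBser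
    = ((-(m:ℤ) : ℤ) : PowerSeries ℤ) * (pvPser ^ m * PowerSeries.derivativeFun pvBser) := by
  induction m with
  | zero => simp [PowerSeries.derivativeFun_one]
  | succ m ih =>
    have hP : pvPser * pvBser = 1 := by rw [mul_comm]; exact pvBP_one
    have hmul := PowerSeries.derivativeFun_mul (pvPser ^ m) pvPser
    rw [← pow_succ] at hmul
    rw [hmul]
    have e1 : (pvPser ^ m • PowerSeries.derivativeFun pvPser
        + pvPser • PowerSeries.derivativeFun (pvPser ^ m)) * pvBser
        = pvPser ^ m * (PowerSeries.derivativeFun pvPser * pvBser)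
          + pvPser * (PowerSeries.derivativeFun (pvPser ^ m) * pvBser) := by
      simp only [smul_eq_mul]; ring
    rw [e1, pv_dP_mul_B, ih]
    push_cast
    ring

noncomputable def pvTc (m : ℕ) (i : ℕ) : ℤ := PowerSeries.coeff i (pvPser ^ m)

lemma pvTc_zero (m : ℕ) : pvTc m 0 = 1 := by
  unfold pvTc
  rw [PowerSeries.coeff_zero_eq_constantCoeff, map_pow]
  have : PowerSeries.constantCoeff (R := ℤ) pvPser = 1 := by
    simp [pvPser, pvPinv_zero]
  rw [this, one_pow]

-- the pentagonal recurrence for the coefficients of pvPser ^ m (j-indexed form)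
lemma pv_master (m n : ℕ) :
    ((n:ℤ)+1) * pvTc m (n+1)
      = ∑ j ∈ Finset.range (n+1),
          ((-(m:ℤ)+1)*((j:ℤ)+1) - ((n:ℤ)+1)) * pvPentB (j+1) * pvTc m (n-j) := by
  set p : ℤ := -(m:ℤ) with hp
  set c : ℕ → ℤ := pvTc m with hcdef
  set F : PowerSeries ℤ := pvPser ^ m with hFdef
  have hcF : ∀ i, PowerSeries.coeff i F = c i := fun i => rfl
  have hbB : ∀ i : ℕ, PowerSeries.coeff i pvBser = pvPentB i := fun i => by
    simp [pvBser]
  have hc := congrArg (PowerSeries.coeff n) (pv_dpow m)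
  have E1 : PowerSeries.coeff n (PowerSeries.derivativeFun F * pvBser)
      = ∑ i ∈ Finset.range (n+1), (c (i+1) * ((i:ℤ)+1)) * pvPentB (n-i) := by
    rw [coeff_mul_range]
    refine Finset.sum_congr rfl fun i _ => ?_
    rw [PowerSeries.coeff_derivativeFun, hcF, hbB]
  have E2 : PowerSeries.coeff n (((p : PowerSeries ℤ)) * (F * PowerSeries.derivativeFun pvBser))
      = p * ∑ i ∈ Finset.range (n+1), c i * (pvPentB (n-i+1) * (((n-i:ℕ):ℤ)+1)) := by
    rw [show ((p : PowerSeries ℤ)) * (F * PowerSeries.derivativeFun pvBser)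
          = p • (F * PowerSeries.derivativeFun pvBser) from (zsmul_eq_mul _ _).symm]
    rw [map_smul, smul_eq_mul, coeff_mul_range]
    congr 1
    exact Finset.sum_congr rfl fun i _ => by
      simp only [PowerSeries.coeff_derivativeFun, hcF, hbB]
  rw [E1, E2] at hc
  -- reflect the E1-sum and peel its j = 0 term
  have R1 : ∑ i ∈ Finset.range (n+1), (c (i+1) * ((i:ℤ)+1)) * pvPentB (n-i)
      = ((n:ℤ)+1) * c (n+1)
        + ∑ j ∈ Finset.range (n+1), ((n:ℤ)-(j:ℤ)) * c (n-j) * pvPentB (j+1) := by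
    rw [← Finset.sum_range_reflect]
    have hA : ∑ j ∈ Finset.range (n+1), (c ((n+1-1-j)+1) * (((n+1-1-j:ℕ):ℤ)+1)) * pvPentB (n-(n+1-1-j))
        = ∑ j ∈ Finset.range (n+1), (c ((n-j)+1) * (((n:ℤ)-(j:ℤ))+1)) * pvPentB j := by
      refine Finset.sum_congr rfl fun j hj => ?_
      have hjn := Finset.mem_range.mp hj
      rw [show n+1-1-j = n-j by omega, show n-(n-j) = j by omega,
          show ((n-j:ℕ):ℤ) = (n:ℤ)-(j:ℤ) by omega]
    rw [hA]
    rw [Finset.sum_range_succ']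
    rw [pvPentB_zero]
    have hpeel : ∀ j ∈ Finset.range n,
        (c ((n-(j+1))+1) * ((n:ℤ) - ((j+1:ℕ):ℤ) + 1)) * pvPentB (j+1)
        = ((n:ℤ)-(j:ℤ)) * c (n-j) * pvPentB (j+1) := by
      intro j hj
      have := Finset.mem_range.mp hj
      rw [show n-(j+1)+1 = n-j by omega]
      push_cast; ring
    rw [Finset.sum_congr rfl hpeel]
    rw [show ∑ j ∈ Finset.range (n+1), ((n:ℤ)-(j:ℤ)) * c (n-j) * pvPentB (j+1)
          = ∑ j ∈ Finset.range n, ((n:ℤ)-(j:ℤ)) * c (n-j) * pvPentB (j+1) by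
        rw [Finset.sum_range_succ]; simp]
    simp only [Nat.sub_zero]
    push_cast; ring
  -- reflect the E2-sum
  have R2 : ∑ i ∈ Finset.range (n+1), c i * (pvPentB (n-i+1) * (((n-i:ℕ):ℤ)+1))
      = ∑ j ∈ Finset.range (n+1), c (n-j) * (pvPentB (j+1) * ((j:ℤ)+1)) := by
    rw [← Finset.sum_range_reflect]
    refine Finset.sum_congr rfl fun j hj => ?_
    have hjn := Finset.mem_range.mp hj
    rw [show n+1-1-j = n-j by omega, show n-(n-j) = j by omega]
  -- assemble
  have Tterm : ∀ j ∈ Finset.range (n+1),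
      ((p+1)*((j:ℤ)+1) - ((n:ℤ)+1)) * pvPentB (j+1) * c (n-j)
        = p * (c (n-j) * (pvPentB (j+1) * ((j:ℤ)+1)))
          - ((n:ℤ)-(j:ℤ)) * c (n-j) * pvPentB (j+1) := fun j _ => by ring
  rw [Finset.sum_congr rfl Tterm, Finset.sum_sub_distrib, ← Finset.mul_sum]
  linear_combination hc - R1 + p * R2

-- k-indexed (generalized pentagonal) form of the master recurrence
lemma pv_master_k (m n : ℕ) :
    ((n:ℤ)+1) * pvTc m (n+1)
      = ∑ k ∈ Finset.Icc (1:ℤ) ((n:ℤ)+1), pvSgn k *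
          ((if pvP1 k ≤ (n:ℤ)+1 then ((-(m:ℤ)+1)*pvP1 k - ((n:ℤ)+1)) * pvTc m (n+1 - (pvP1 k).toNat) else 0)
           + (if pvP2 k ≤ (n:ℤ)+1 then ((-(m:ℤ)+1)*pvP2 k - ((n:ℤ)+1)) * pvTc m (n+1 - (pvP2 k).toNat) else 0)) := by
  have hS := pvS (n+1) (fun j => ((-(m:ℤ)+1)*(j:ℤ) - ((n:ℤ)+1)) * pvTc m (n+1-j))
  have hL : ∑ j ∈ Finset.range (n+1),
        pvPentB (j+1) * (((-(m:ℤ)+1)*((j+1:ℕ):ℤ) - ((n:ℤ)+1)) * pvTc m (n+1-(j+1)))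
      = ∑ j ∈ Finset.range (n+1),
          ((-(m:ℤ)+1)*((j:ℤ)+1) - ((n:ℤ)+1)) * pvPentB (j+1) * pvTc m (n-j) := by
    refine Finset.sum_congr rfl fun j hj => ?_
    rw [show n+1-(j+1) = n-j by omega]
    push_cast; ring
  rw [pv_master m n, ← hL, hS]
  rw [show (((n+1:ℕ)):ℤ) = (n:ℤ)+1 by push_cast; ring]
  refine Finset.sum_congr rfl fun k hk => ?_
  have hk1 : 1 ≤ k := (Finset.mem_Icc.mp hk).1
  have h1 : (0:ℤ) ≤ pvP1 k := le_trans (by omega) (pvP1_pos k hk1)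
  have h2 : (0:ℤ) ≤ pvP2 k := le_trans h1 (pvP1_le_P2 k (by omega))
  congr 1
  congr 1
  · split_ifs with hle
    · rw [Int.toNat_of_nonneg h1]
    · rfl
  · split_ifs with hle
    · rw [Int.toNat_of_nonneg h2]
    · rfl

-- k-indexed form of the pvPinv recurrence
lemma pvPinv_succ_k (n : ℕ) :
    pvPinv (n+1)
      = ∑ k ∈ Finset.Icc (1:ℤ) ((n:ℤ)+1), (-pvSgn k) *
          ((if pvP1 k ≤ (n:ℤ)+1 then pvPinv (n+1 - (pvP1 k).toNat) else 0)
           + (if pvP2 k ≤ (n:ℤ)+1 then pvPinv (n+1 - (pvP2 k).toNat) else 0)) := by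
  have hS := pvS (n+1) (fun j => pvPinv (n+1-j))
  have hL : ∑ j ∈ Finset.range (n+1), pvPentB (j+1) * pvPinv (n+1-(j+1))
      = ∑ j ∈ Finset.range (n+1), pvPentB (j+1) * pvPinv (n-j) := by
    refine Finset.sum_congr rfl fun j hj => ?_
    rw [show n+1-(j+1) = n-j by omega]
  rw [pvPinv_succ, ← hL, hS]
  rw [show (((n+1:ℕ)):ℤ) = (n:ℤ)+1 by push_cast; ring]
  rw [← Finset.sum_neg_distrib]
  refine Finset.sum_congr rfl fun k hk => ?_
  ring

-- coefficients of successive powers by one convolution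
lemma pvTc_succ (m n : ℕ) :
    pvTc (m+1) n = ∑ i ∈ Finset.range (n+1), pvTc m i * pvPinv (n-i) := by
  unfold pvTc
  rw [pow_succ, coeff_mul_range]
  refine Finset.sum_congr rfl fun i _ => ?_
  simp [pvPser]

-- ===== bridges между ports and math =====
lemma pyRange_one_nil {a b : ℤ} (h : b ≤ a) : PySem.List.pyRange a b 1 = [] := by
  rw [PySem.List.pyRange_one, show (b - a).toNat = 0 by omega]
  rfl

lemma pvP1_floordiv (k : ℤ) : PySem.Int.floordiv (k*(3*k-1)) 2 = pvP1 k := by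
  rw [PySem.Int.floordiv_eq_ediv_of_pos (by omega)]; rfl

lemma pvP2_floordiv (k : ℤ) : PySem.Int.floordiv (k*(3*k+1)) 2 = pvP2 k := by
  rw [PySem.Int.floordiv_eq_ediv_of_pos (by omega)]; rfl

lemma pvSgn_mod (k : ℤ) : (if PySem.Int.mod k 2 = 0 then (1:ℤ) else -1) = pvSgn k := by
  rw [PySem.Int.mod_eq_emod_of_pos (by omega)]; rfl

lemma pvSgn_pow (k : ℤ) (hk : 0 ≤ k) : ((-1:ℤ))^(k+1).natAbs = -pvSgn k := by
  have e1 : (((k+1).natAbs : ℕ) : ℤ) = ((k.natAbs : ℕ) : ℤ) + 1 := by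
    rw [Int.natAbs_of_nonneg (by omega), Int.natAbs_of_nonneg hk]
  have h1 : (k+1).natAbs = k.natAbs + 1 := by omega
  rw [h1, pow_succ]
  have h2 : ((-1:ℤ))^k.natAbs = pvSgn k := by
    unfold pvSgn
    rcases Int.even_or_odd k with he | ho
    · rw [if_pos (Int.even_iff.mp he)]
      exact Even.neg_one_pow (Int.natAbs_even.mpr he)
    · rw [if_neg (by rw [Int.odd_iff] at ho; omega)]
      exact Odd.neg_one_pow (Int.natAbs_odd.mpr ho)
  rw [h2]; ring

-- the partially-filled coefficient list
def pvMix (N t : ℕ) (g : ℕ → ℤ) : List Int :=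
  (List.range N).map (fun i => if i ≤ t then g i else 0)

lemma pvMix_getD (N t : ℕ) (g : ℕ → ℤ) (i : ℕ) (hi : i < N) :
    PySem.List.pyGetD (pvMix N t g) (i:ℤ) 0 = if i ≤ t then g i else 0 := by
  rw [PySem.List.pyGetD_natCast]
  unfold pvMix
  rw [List.getD_eq_getElem _ _ (by simpa using hi)]
  simp

lemma pvMix_init (N : ℕ) (hN : 1 ≤ N) (g : ℕ → ℤ) (hg : g 0 = 1) :
    PySem.List.pySetD (List.replicate N (0:ℤ)) 0 1 = pvMix N 0 g := by
  rw [PySem.List.pySetD_of_nonneg]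
  swap
  · omega
  rw [show ((0:ℤ)).toNat = 0 from rfl]
  apply List.ext_getElem
  · simp [pvMix]
  · intro i h1 h2
    simp only [pvMix]
    rw [List.getElem_set]
    simp only [List.length_replicate] at h1
    rw [List.getElem_map, List.getElem_range]
    by_cases hi : i = 0
    · subst hi; simp [hg]
    · rw [if_neg (by omega), List.getElem_replicate, if_neg (by omega)]

lemma pvMix_set (N t : ℕ) (g : ℕ → ℤ) (ht : t + 1 < N) (v : ℤ) (hv : v = g (t+1)) :
    PySem.List.pySetD (pvMix N t g) (((t+1:ℕ)):ℤ) v = pvMix N (t+1) g := by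
  rw [PySem.List.pySetD_natCast]
  apply List.ext_getElem
  · simp [pvMix]
  · intro i h1 h2
    simp only [pvMix, List.getElem_set, List.getElem_map, List.getElem_range,
               List.length_set, List.length_map, List.length_range] at *
    by_cases hi : t + 1 = i
    · subst hi; simp [hv]
    · rw [if_neg hi]
      by_cases hle : i ≤ t
      · rw [if_pos hle, if_pos (by omega)]
      · rw [if_neg hle, if_neg (by omega)]

lemma pvMix_full (N t : ℕ) (g : ℕ → ℤ) (ht : N ≤ t + 1) :
    pvMix N t g = (List.range N).map g := by
  unfold pvMix
  refine List.map_congr_left fun i hi => ?_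
  rw [if_pos (by have := List.mem_range.mp hi; omega)]

lemma pvP1_succ_ge (k : ℤ) (hk : 1 ≤ k) : pvP1 k + 1 ≤ pvP1 (k+1) := by
  have h1 := pvP1_two_mul k; have h2 := pvP1_two_mul (k+1)
  nlinarith

lemma pvP2_lt_P1_succ (k : ℤ) (hk : 0 ≤ k) : pvP2 k < pvP1 (k+1) := by
  have h1 := pvP2_two_mul k; have h2 := pvP1_two_mul (k+1)
  nlinarith

-- tail of the k-sum vanishes once pvP1 a exceeds n
lemma pvTailZero (n : ℕ) (a : ℤ) (ha : 1 ≤ a) (hbig : (n:ℤ) < pvP1 a) (c t1 t2 : ℤ → ℤ) :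
    ∑ k' ∈ Finset.Icc a (n:ℤ), c k' *
        ((if pvP1 k' ≤ (n:ℤ) then t1 k' else 0) + (if pvP2 k' ≤ (n:ℤ) then t2 k' else 0)) = 0 := by
  refine Finset.sum_eq_zero fun k' hk' => ?_
  obtain ⟨hak', _⟩ := Finset.mem_Icc.mp hk'
  have hm := pvP1_mono ha hak'
  have hp2 := pvP1_le_P2 k' (by omega)
  rw [if_neg (by omega), if_neg (by omega)]
  ring

lemma pvBSum_eq (nmax : ℤ) (f : List Int) (pw : ℤ) (n : ℕ) (hn : (n:ℤ) < nmax) :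
    ∀ (fuel : ℕ) (k : ℤ), 1 ≤ k → (nmax - pvP1 k).toNat ≤ fuel → ∀ s : ℤ,
      pvBSum f pw (n:ℤ) (pvBuildPent nmax k fuel) s
        = s + ∑ k' ∈ Finset.Icc k (n:ℤ), pvSgn k' *
            ((if pvP1 k' ≤ (n:ℤ) then ((pw+1)*pvP1 k' - (n:ℤ)) * PySem.List.pyGetD f ((n:ℤ) - pvP1 k') 0 else 0)
             + (if pvP2 k' ≤ (n:ℤ) then ((pw+1)*pvP2 k' - (n:ℤ)) * PySem.List.pyGetD f ((n:ℤ) - pvP2 k') 0 else 0)) := by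
  intro fuel
  induction fuel with
  | zero =>
    intro k hk hfuel s
    have hbig : (n:ℤ) < pvP1 k := by omega
    simp only [pvBuildPent, pvBSum]
    rw [pvTailZero n k hk hbig]
    ring
  | succ fuel ih =>
    intro k hk hfuel s
    simp only [pvBuildPent, pvP1_floordiv, pvP2_floordiv, pvSgn_mod]
    by_cases hP1max : pvP1 k < nmax
    · rw [if_pos hP1max]
      simp only [pvBSum]
      by_cases hbreak : pvP1 k > (n:ℤ)
      · rw [if_pos hbreak, pvTailZero n k hk (by omega)]
        ring
      · rw [if_neg hbreak]
        have hkn : k ≤ (n:ℤ) := le_trans (pvP1_ge k hk) (by omega)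
        have hsplit : Finset.Icc k (n:ℤ) = insert k (Finset.Icc (k+1) (n:ℤ)) := by
          ext a; simp only [Finset.mem_insert, Finset.mem_Icc]; omega
        have hnotmem : k ∉ Finset.Icc (k+1) (n:ℤ) := by simp [Finset.mem_Icc]
        have hfuel' : (nmax - pvP1 (k+1)).toNat ≤ fuel := by
          have := pvP1_succ_ge k hk; omega
        by_cases hp2n : pvP2 k ≤ (n:ℤ)
        · rw [if_pos (by omega : pvP2 k < nmax)]
          rw [List.singleton_append]
          simp only [pvBSum]
          rw [if_neg (by omega : ¬ pvP2 k > (n:ℤ))]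
          rw [ih (k+1) (by omega) hfuel' _]
          rw [hsplit, Finset.sum_insert hnotmem]
          rw [if_pos (by omega : pvP1 k ≤ (n:ℤ)), if_pos hp2n]
          ring
        · by_cases hp2max : pvP2 k < nmax
          · rw [if_pos hp2max]
            rw [List.singleton_append]
            simp only [pvBSum]
            rw [if_pos (by omega : pvP2 k > (n:ℤ))]
            rw [hsplit, Finset.sum_insert hnotmem]
            rw [if_pos (by omega : pvP1 k ≤ (n:ℤ)), if_neg hp2n]
            rw [pvTailZero n (k+1) (by omega) (by have := pvP2_lt_P1_succ k (by omega); omega)]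
            ring
          · rw [if_neg hp2max]
            rw [List.nil_append]
            rw [ih (k+1) (by omega) hfuel' _]
            rw [hsplit, Finset.sum_insert hnotmem]
            rw [if_pos (by omega : pvP1 k ≤ (n:ℤ)), if_neg hp2n]
            ring
    · rw [if_neg hP1max]
      simp only [pvBSum]
      rw [pvTailZero n k hk (by omega)]
      ring



lemma pvInvInner_eq (inv : List Int) (n : ℕ)
    (hread : ∀ i : ℕ, i < n → PySem.List.pyGetD inv (i:ℤ) 0 = pvPinv i) :
    ∀ (len : ℕ) (a : ℤ), 1 ≤ a → ((n:ℤ)+1 - a).toNat = len → ∀ s : ℤ,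
      pvInvInner inv (n:ℤ) (PySem.List.pyRange a ((n:ℤ)+1) 1) s
        = s + ∑ k ∈ Finset.Icc a (n:ℤ), (-pvSgn k) *
            ((if pvP1 k ≤ (n:ℤ) then pvPinv (n - (pvP1 k).toNat) else 0)
             + (if pvP2 k ≤ (n:ℤ) then pvPinv (n - (pvP2 k).toNat) else 0)) := by
  intro len
  induction len with
  | zero =>
    intro a ha hlen s
    rw [pyRange_one_nil (by omega)]
    simp only [pvInvInner]
    rw [Finset.Icc_eq_empty (by omega : ¬ a ≤ (n:ℤ)), Finset.sum_empty]
    ring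
  | succ len ih =>
    intro a ha hlen s
    have han : a ≤ (n:ℤ) := by omega
    rw [PySem.List.pyRange_one_cons (by omega : a < (n:ℤ)+1)]
    simp only [pvInvInner, pvP1_floordiv, pvP2_floordiv]
    rw [pvSgn_pow a (by omega)]
    have hsplit : Finset.Icc a (n:ℤ) = insert a (Finset.Icc (a+1) (n:ℤ)) := by
      ext x; simp only [Finset.mem_insert, Finset.mem_Icc]; omega
    have hnotmem : a ∉ Finset.Icc (a+1) (n:ℤ) := by simp [Finset.mem_Icc]
    by_cases hbr : pvP1 a > (n:ℤ)
    · rw [if_pos hbr, pvTailZero n a ha (by omega)]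
      ring
    · rw [if_neg hbr]
      have hP1a : 1 ≤ pvP1 a := pvP1_pos a ha
      have hg1 : PySem.List.pyGetD inv ((n:ℤ) - pvP1 a) 0 = pvPinv (n - (pvP1 a).toNat) := by
        rw [show (n:ℤ) - pvP1 a = ((n - (pvP1 a).toNat : ℕ) : ℤ) by omega]
        exact hread _ (by omega)
      rw [hg1]
      rw [ih (a+1) (by omega) (by omega) _]
      rw [hsplit, Finset.sum_insert hnotmem]
      rw [if_pos (by omega : pvP1 a ≤ (n:ℤ))]
      by_cases hp2 : pvP2 a ≤ (n:ℤ)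
      · rw [if_pos hp2, if_pos hp2]
        have hP2a : 1 ≤ pvP2 a := le_trans ha (pvP2_ge a ha)
        have hg2 : PySem.List.pyGetD inv ((n:ℤ) - pvP2 a) 0 = pvPinv (n - (pvP2 a).toNat) := by
          rw [show (n:ℤ) - pvP2 a = ((n - (pvP2 a).toNat : ℕ) : ℤ) by omega]
          exact hread _ (by omega)
        rw [hg2]
        ring
      · rw [if_neg hp2, if_neg hp2]
        ring


-- A's negative-branch table loop fills pvMix with pvPinv
lemma pvInvLoop (N : ℕ) (hN : 1 ≤ N) :
    ∀ (len t : ℕ), 1 ≤ t → N - t = len →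
      (PySem.List.pyRange (t:ℤ) (N:ℤ) 1).foldl
        (fun inv n => PySem.List.pySetD inv n (pvInvInner inv n (PySem.List.pyRange 1 (n+1) 1) 0))
        (pvMix N (t-1) pvPinv)
      = (List.range N).map pvPinv := by
  intro len
  induction len with
  | zero =>
    intro t ht hlen
    rw [pyRange_one_nil (by omega), List.foldl_nil]
    exact pvMix_full N (t-1) pvPinv (by omega)
  | succ len ih =>
    intro t ht hlen
    have htN : t < N := by omega
    rw [PySem.List.pyRange_one_cons (by omega : (t:ℤ) < (N:ℤ)), List.foldl_cons]
    have hread : ∀ i : ℕ, i < t → PySem.List.pyGetD (pvMix N (t-1) pvPinv) (i:ℤ) 0 = pvPinv i := by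
      intro i hi
      rw [pvMix_getD N (t-1) pvPinv i (by omega), if_pos (by omega)]
    have hinner : pvInvInner (pvMix N (t-1) pvPinv) (t:ℤ) (PySem.List.pyRange 1 ((t:ℤ)+1) 1) 0
        = pvPinv t := by
      rw [pvInvInner_eq (pvMix N (t-1) pvPinv) t hread t 1 (by omega) (by omega) 0]
      obtain ⟨u, rfl⟩ : ∃ u, t = u + 1 := ⟨t-1, by omega⟩
      rw [pvPinv_succ_k u, show ((u+1:ℕ):ℤ) = (u:ℤ)+1 by push_cast; ring]
      ring
    rw [hinner]
    have hset : PySem.List.pySetD (pvMix N (t-1) pvPinv) (t:ℤ) (pvPinv t) = pvMix N t pvPinv := by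
      rw [show ((t:ℕ):ℤ) = (((t-1)+1:ℕ):ℤ) by omega]
      rw [pvMix_set N (t-1) pvPinv (by omega) _ (by rw [show t-1+1 = t by omega])]
      rw [show t-1+1 = t by omega]
    rw [hset]
    have := ih (t+1) (by omega) (by omega)
    rw [show t+1-1 = t by omega] at this
    push_cast at this ⊢
    exact this

-- B's loop fills pvMix with the coefficients of pvPser ^ m
lemma pvBLoop (N m : ℕ) (hN : 1 ≤ N) (pw : ℤ) (hpw : pw = -(m:ℤ)) :
    ∀ (len t : ℕ), 1 ≤ t → N - t = len →
      (PySem.List.pyRange (t:ℤ) (N:ℤ) 1).foldl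
        (fun f n => PySem.List.pySetD f n
          (PySem.Int.floordiv (pvBSum f pw n (pvBuildPent (N:ℤ) 1 (N+1)) 0) n))
        (pvMix N (t-1) (pvTc m))
      = (List.range N).map (pvTc m) := by
  intro len
  induction len with
  | zero =>
    intro t ht hlen
    rw [pyRange_one_nil (by omega), List.foldl_nil]
    exact pvMix_full N (t-1) (pvTc m) (by omega)
  | succ len ih =>
    intro t ht hlen
    have htN : t < N := by omega
    have hP11 : pvP1 1 = 1 := by have := pvP1_two_mul 1; omega
    have hsum : pvBSum (pvMix N (t-1) (pvTc m)) pw (t:ℤ) (pvBuildPent (N:ℤ) 1 (N+1)) 0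
        = (t:ℤ) * pvTc m t := by
      rw [pvBSum_eq (N:ℤ) (pvMix N (t-1) (pvTc m)) pw t (by omega) (N+1) 1 (by omega)
            (by rw [hP11]; omega) 0]
      have hcongr : ∀ k' ∈ Finset.Icc (1:ℤ) (t:ℤ), pvSgn k' *
            ((if pvP1 k' ≤ (t:ℤ) then ((pw+1)*pvP1 k' - (t:ℤ)) * PySem.List.pyGetD (pvMix N (t-1) (pvTc m)) ((t:ℤ) - pvP1 k') 0 else 0)
             + (if pvP2 k' ≤ (t:ℤ) then ((pw+1)*pvP2 k' - (t:ℤ)) * PySem.List.pyGetD (pvMix N (t-1) (pvTc m)) ((t:ℤ) - pvP2 k') 0 else 0))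
          = pvSgn k' *
            ((if pvP1 k' ≤ (t:ℤ) then ((-(m:ℤ)+1)*pvP1 k' - (t:ℤ)) * pvTc m (t - (pvP1 k').toNat) else 0)
             + (if pvP2 k' ≤ (t:ℤ) then ((-(m:ℤ)+1)*pvP2 k' - (t:ℤ)) * pvTc m (t - (pvP2 k').toNat) else 0)) := by
        intro k' hk'
        have hk1 : 1 ≤ k' := (Finset.mem_Icc.mp hk').1
        have hp1 : 1 ≤ pvP1 k' := pvP1_pos k' hk1
        have hp2 : 1 ≤ pvP2 k' := le_trans hk1 (pvP2_ge k' hk1)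
        congr 1
        congr 1
        · split_ifs with hle
          · rw [show (t:ℤ) - pvP1 k' = ((t - (pvP1 k').toNat : ℕ) : ℤ) by omega,
                pvMix_getD N (t-1) (pvTc m) _ (by omega), if_pos (by omega), hpw]
          · rfl
        · split_ifs with hle
          · rw [show (t:ℤ) - pvP2 k' = ((t - (pvP2 k').toNat : ℕ) : ℤ) by omega,
                pvMix_getD N (t-1) (pvTc m) _ (by omega), if_pos (by omega), hpw]
          · rfl
      rw [Finset.sum_congr rfl hcongr]
      obtain ⟨u, rfl⟩ : ∃ u, t = u + 1 := ⟨t-1, by omega⟩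
      have hmk := pv_master_k m u
      rw [show ((u+1:ℕ):ℤ) = (u:ℤ)+1 by push_cast; ring]
      rw [← hmk]
      ring
    rw [PySem.List.pyRange_one_cons (by omega : (t:ℤ) < (N:ℤ)), List.foldl_cons, hsum]
    have hdiv : PySem.Int.floordiv ((t:ℤ) * pvTc m t) (t:ℤ) = pvTc m t := by
      rw [PySem.Int.floordiv_eq_ediv_of_pos (by omega)]
      exact Int.mul_ediv_cancel_left _ (by omega)
    rw [hdiv]
    have hset : PySem.List.pySetD (pvMix N (t-1) (pvTc m)) (t:ℤ) (pvTc m t) = pvMix N t (pvTc m) := by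
      rw [show ((t:ℕ):ℤ) = (((t-1)+1:ℕ):ℤ) by omega]
      rw [pvMix_set N (t-1) (pvTc m) (by omega) _ (by rw [show t-1+1 = t by omega])]
      rw [show t-1+1 = t by omega]
    rw [hset]
    have := ih (t+1) (by omega) (by omega)
    rw [show t+1-1 = t by omega] at this
    exact this


lemma pvMapGetD (N : ℕ) (g : ℕ → ℤ) (i : ℕ) (hi : i < N) :
    PySem.List.pyGetD ((List.range N).map g) (i:ℤ) 0 = g i := by
  rw [PySem.List.pyGetD_natCast, List.getD_eq_getElem _ _ (by simpa using hi)]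
  simp

lemma pvMapSetD (N i : ℕ) (hi : i < N) (g : ℕ → ℤ) (v : ℤ) :
    PySem.List.pySetD ((List.range N).map g) (i:ℤ) v
      = (List.range N).map (fun n => if n = i then v else g n) := by
  rw [PySem.List.pySetD_natCast]
  apply List.ext_getElem
  · simp
  · intro x h1 h2
    simp only [List.getElem_set, List.getElem_map, List.getElem_range]
    by_cases hx : i = x
    · subst hx; simp
    · rw [if_neg hx, if_neg (by omega)]

lemma pvMapCongr (N : ℕ) (f1 f2 : ℕ → ℤ) (h : ∀ n, n < N → f1 n = f2 n) :
    (List.range N).map f1 = (List.range N).map f2 :=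
  List.map_congr_left fun n hn => h n (List.mem_range.mp hn)

def pvSA (N : ℕ) (φ ψ : ℕ → ℤ) (a : ℕ) : List Int :=
  (List.range N).map (fun n => ∑ i ∈ Finset.range (min a (n+1)), φ i * ψ (n-i))

def pvSI (N : ℕ) (φ ψ : ℕ → ℤ) (a b : ℕ) : List Int :=
  (List.range N).map (fun n =>
    (∑ i ∈ Finset.range (min a (n+1)), φ i * ψ (n-i))
      + if a ≤ n ∧ n - a < b then φ a * ψ (n - a) else 0)

lemma pvSI_zero (N : ℕ) (φ ψ : ℕ → ℤ) (a : ℕ) : pvSI N φ ψ a 0 = pvSA N φ ψ a := by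
  unfold pvSI pvSA
  exact pvMapCongr N _ _ fun n _ => by rw [if_neg (by omega)]; ring

lemma pvSI_full (N : ℕ) (φ ψ : ℕ → ℤ) (a : ℕ) (ha : a < N) :
    pvSI N φ ψ a (N - a) = pvSA N φ ψ (a+1) := by
  unfold pvSI pvSA
  refine pvMapCongr N _ _ fun n hn => ?_
  by_cases han : a ≤ n
  · rw [if_pos ⟨han, by omega⟩, show min a (n+1) = a by omega, show min (a+1) (n+1) = a+1 by omega]
    rw [Finset.sum_range_succ]
  · rw [if_neg (by omega), show min a (n+1) = min (a+1) (n+1) by omega]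
    ring

lemma pvSA_zero_step (N : ℕ) (φ ψ : ℕ → ℤ) (a : ℕ) (ha : a < N) (h0 : φ a = 0) :
    pvSA N φ ψ a = pvSA N φ ψ (a+1) := by
  unfold pvSA
  refine pvMapCongr N _ _ fun n hn => ?_
  by_cases han : a ≤ n
  · rw [show min a (n+1) = a by omega, show min (a+1) (n+1) = a+1 by omega,
        Finset.sum_range_succ, h0]
    ring
  · rw [show min a (n+1) = min (a+1) (n+1) by omega]

lemma pvSA_start (N : ℕ) (φ ψ : ℕ → ℤ) : List.replicate N (0:ℤ) = pvSA N φ ψ 0 := by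
  unfold pvSA
  apply List.ext_getElem
  · simp
  · intro i h1 h2
    simp

lemma pvSA_final (N : ℕ) (φ ψ : ℕ → ℤ) :
    pvSA N φ ψ N = (List.range N).map (fun n => ∑ i ∈ Finset.range (n+1), φ i * ψ (n-i)) := by
  unfold pvSA
  refine pvMapCongr N _ _ fun n hn => ?_
  rw [show min N (n+1) = n+1 by omega]

-- the inner j-loop of _convolve_int
lemma pvConvInner (N : ℕ) (φ ψ : ℕ → ℤ) (a : ℕ) (ha : a < N) (hφ : φ a ≠ 0) :
    ∀ (len b : ℕ), (N - a) - b = len → b ≤ N - a →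
      (PySem.List.pyRange (b:ℤ) ((N:ℤ) - (a:ℤ)) 1).foldl
        (fun result j => PySem.List.pySetD result ((a:ℤ)+j)
          (PySem.List.pyGetD result ((a:ℤ)+j) 0
            + PySem.List.pyGetD ((List.range N).map φ) (a:ℤ) 0
              * PySem.List.pyGetD ((List.range N).map ψ) j 0))
        (pvSI N φ ψ a b)
      = pvSI N φ ψ a (N - a) := by
  intro len
  induction len with
  | zero =>
    intro b hlen hble
    rw [pyRange_one_nil (by omega), List.foldl_nil, show b = N - a by omega]
  | succ len ih =>
    intro b hlen hble
    have hbN : a + b < N := by omega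
    rw [PySem.List.pyRange_one_cons (by omega : (b:ℤ) < (N:ℤ) - (a:ℤ)), List.foldl_cons]
    have happ : PySem.List.pySetD (pvSI N φ ψ a b) ((a:ℤ)+(b:ℤ))
          (PySem.List.pyGetD (pvSI N φ ψ a b) ((a:ℤ)+(b:ℤ)) 0
            + PySem.List.pyGetD ((List.range N).map φ) (a:ℤ) 0
              * PySem.List.pyGetD ((List.range N).map ψ) (b:ℤ) 0)
        = pvSI N φ ψ a (b+1) := by
      rw [pvMapGetD N φ a ha, pvMapGetD N ψ b (by omega)]
      rw [show (a:ℤ)+(b:ℤ) = ((a+b:ℕ):ℤ) by push_cast; ring]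
      unfold pvSI
      rw [pvMapGetD N _ (a+b) hbN, pvMapSetD N (a+b) hbN]
      refine pvMapCongr N _ _ fun n hn => ?_
      by_cases hna : n = a + b
      · subst hna
        rw [if_pos rfl, if_neg (by omega : ¬(a ≤ a+b ∧ a+b-a < b)), if_pos (by omega)]
        rw [show a+b-a = b by omega]
        ring
      · rw [if_neg hna]
        by_cases hg : a ≤ n ∧ n - a < b
        · rw [if_pos hg, if_pos (by omega)]
        · rw [if_neg hg, if_neg (by omega)]
    rw [happ]
    rw [show ((b:ℤ)+1) = (((b+1:ℕ)):ℤ) by push_cast; ring]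
    exact ih (b+1) (by omega) (by omega)

-- the outer i-loop of _convolve_int
lemma pvConvOuter (N : ℕ) (φ ψ : ℕ → ℤ) :
    ∀ (len a : ℕ), N - a = len →
      (PySem.List.pyRange (a:ℤ) (N:ℤ) 1).foldl
        (fun result i =>
          if PySem.List.pyGetD ((List.range N).map φ) i 0 = 0 then result
          else
            (PySem.List.pyRange 0 (min ((((List.range N).map ψ).length : ℕ):ℤ) ((N:ℤ) - i)) 1).foldl
              (fun result j => PySem.List.pySetD result (i+j)
                (PySem.List.pyGetD result (i+j) 0
                  + PySem.List.pyGetD ((List.range N).map φ) i 0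
                    * PySem.List.pyGetD ((List.range N).map ψ) j 0))
              result)
        (pvSA N φ ψ a)
      = pvSA N φ ψ N := by
  intro len
  induction len with
  | zero =>
    intro a hlen
    rw [pyRange_one_nil (by omega), List.foldl_nil]
    unfold pvSA
    exact pvMapCongr N _ _ fun n hn => by rw [show min a (n+1) = min N (n+1) by omega]
  | succ len ih =>
    intro a hlen
    have haN : a < N := by omega
    rw [PySem.List.pyRange_one_cons (by omega : (a:ℤ) < (N:ℤ)), List.foldl_cons]
    have happ : (if PySem.List.pyGetD ((List.range N).map φ) (a:ℤ) 0 = 0 then pvSA N φ ψ a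
          else (PySem.List.pyRange 0 (min ((((List.range N).map ψ).length : ℕ):ℤ) ((N:ℤ) - (a:ℤ))) 1).foldl
            (fun result j => PySem.List.pySetD result ((a:ℤ)+j)
              (PySem.List.pyGetD result ((a:ℤ)+j) 0
                + PySem.List.pyGetD ((List.range N).map φ) (a:ℤ) 0
                  * PySem.List.pyGetD ((List.range N).map ψ) j 0))
            (pvSA N φ ψ a))
        = pvSA N φ ψ (a+1) := by
      by_cases h0 : φ a = 0
      · rw [if_pos ((pvMapGetD N φ a haN).trans h0)]
        exact pvSA_zero_step N φ ψ a haN h0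
      · rw [if_neg (fun h => h0 (((pvMapGetD N φ a haN).symm).trans h))]
        rw [show (((((List.range N).map ψ).length : ℕ)):ℤ) = (N:ℤ) by simp]
        rw [show min (N:ℤ) ((N:ℤ) - (a:ℤ)) = (N:ℤ) - (a:ℤ) by omega]
        rw [show (pvSA N φ ψ a) = pvSI N φ ψ a 0 from (pvSI_zero N φ ψ a).symm]
        have hin := pvConvInner N φ ψ a haN h0 (N - a) 0 (by omega) (by omega)
        rw [show (((0:ℕ)):ℤ) = (0:ℤ) by simp] at hin
        rw [hin]
        exact pvSI_full N φ ψ a haN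
    rw [happ]
    have := ih (a+1) (by omega)
    rw [show (((a+1:ℕ)):ℤ) = (a:ℤ)+1 by push_cast; ring] at this
    exact this


lemma pvTc0_off (i : ℕ) (hi : 0 < i) : pvTc 0 i = 0 := by
  unfold pvTc
  rw [pow_zero, PowerSeries.coeff_one, if_neg (by omega)]

lemma pvConv_eq (N : ℕ) (φ ψ : ℕ → ℤ) :
    pvConvolveInt ((List.range N).map φ) ((List.range N).map ψ) (N:ℤ)
      = (List.range N).map (fun n => ∑ i ∈ Finset.range (n+1), φ i * ψ (n-i)) := by
  unfold pvConvolveInt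
  rw [show ((((List.range N).map φ).length : ℕ):ℤ) = (N:ℤ) by simp]
  rw [min_self]
  rw [show ((N:ℤ)).toNat = N by simp]
  rw [pvSA_start N φ ψ]
  have h := pvConvOuter N φ ψ N 0 (by omega)
  rw [show (((0:ℕ)):ℤ) = (0:ℤ) by simp] at h
  rw [h]
  exact pvSA_final N φ ψ

lemma pvConvIter (N : ℕ) (m : ℕ) :
    (List.range m).foldl (fun r _ => pvConvolveInt r ((List.range N).map pvPinv) (N:ℤ))
        ((List.range N).map (pvTc 0))
      = (List.range N).map (pvTc m) := by
  induction m with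
  | zero => rw [List.range_zero, List.foldl_nil]
  | succ m ih =>
    rw [List.range_succ, List.foldl_append, ih, List.foldl_cons, List.foldl_nil]
    rw [pvConv_eq N (pvTc m) pvPinv]
    refine pvMapCongr N _ _ fun n hn => ?_
    exact (pvTc_succ m n).symm

lemma pvMixTc_full (N : ℕ) (m : ℕ) : pvMix N 0 (pvTc m) = (List.range N).map (pvTc 0) := by
  unfold pvMix
  refine pvMapCongr N _ _ fun n hn => ?_
  by_cases h : n = 0
  · subst h; rw [if_pos (le_refl 0), pvTc_zero, pvTc_zero]
  · rw [if_neg (by omega), pvTc0_off n (by omega)]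

-- B's port on nonpositive power
lemma pvBalt (N : ℕ) (hN : 1 ≤ N) (power : ℤ) (hpow : power < 0) :
    eta_power_coeffs_alt (N:ℤ) power = (List.range N).map (pvTc power.natAbs) := by
  have hshape : eta_power_coeffs_alt (N:ℤ) power
      = (PySem.List.pyRange 1 (N:ℤ) 1).foldl
          (fun f n => PySem.List.pySetD f n
            (PySem.Int.floordiv (pvBSum f power n (pvBuildPent (N:ℤ) 1 (((N:ℤ)).toNat+1)) 0) n))
          (PySem.List.pySetD (List.replicate ((N:ℤ)).toNat (0:Int)) 0 1) := by
    unfold eta_power_coeffs_alt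
    rw [if_neg (by omega)]
  rw [hshape]
  simp only [show ((N:ℤ)).toNat = N from by simp]
  rw [pvMix_init N hN (pvTc power.natAbs) (pvTc_zero _)]
  have h := pvBLoop N power.natAbs hN power (by omega) (N-1) 1 (le_refl 1) (by omega)
  rw [show ((1:ℕ):ℤ) = (1:ℤ) by simp, show (1-1 : ℕ) = 0 by omega] at h
  exact h

-- A's port on negative power
lemma pvAneg (N : ℕ) (hN : 1 ≤ N) (power : ℤ) (hpow : power < 0) :
    eta_power_coeffs (N:ℤ) power = (List.range N).map (pvTc power.natAbs) := by
  have hshape : eta_power_coeffs (N:ℤ) power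
      = (List.range power.natAbs).foldl
          (fun result _ => pvConvolveInt result
            ((PySem.List.pyRange 1 (N:ℤ) 1).foldl
              (fun inv n => PySem.List.pySetD inv n
                (pvInvInner inv n (PySem.List.pyRange 1 (n+1) 1) 0))
              (PySem.List.pySetD (List.replicate ((N:ℤ)).toNat (0:Int)) 0 1)) (N:ℤ))
          (PySem.List.pySetD (List.replicate ((N:ℤ)).toNat (0:Int)) 0 1) := by
    unfold eta_power_coeffs
    rw [if_neg (by omega), if_neg (by omega)]
  rw [hshape]
  simp only [show ((N:ℤ)).toNat = N from by simp]
  have hInv : (PySem.List.pyRange 1 (N:ℤ) 1).foldl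
      (fun inv n => PySem.List.pySetD inv n
        (pvInvInner inv n (PySem.List.pyRange 1 (n+1) 1) 0))
      (PySem.List.pySetD (List.replicate N (0:Int)) 0 1)
      = (List.range N).map pvPinv := by
    rw [pvMix_init N hN pvPinv pvPinv_zero]
    have h := pvInvLoop N hN (N-1) 1 (le_refl 1) (by omega)
    rw [show ((1:ℕ):ℤ) = (1:ℤ) by simp, show (1-1 : ℕ) = 0 by omega] at h
    exact h
  rw [hInv, pvMix_init N hN (pvTc 0) (pvTc_zero 0), pvMixTc_full N 0]
  exact pvConvIter N power.natAbs

-- positive power, nmax = 1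
lemma pvFold1 (l : List ℕ) : l.foldl (fun r (_ : ℕ) => pvConvolveInt r [1] 1) [1] = [1] := by
  induction l with
  | nil => rfl
  | cons x xs ih =>
    rw [List.foldl_cons, show pvConvolveInt [1] [1] 1 = [1] from by decide]
    exact ih

lemma pvApos1 (power : ℤ) (hp : 0 < power) : eta_power_coeffs 1 power = [1] := by
  have hshape : eta_power_coeffs 1 power
      = (List.range power.toNat).foldl
          (fun result _ => pvConvolveInt result (pvEtaCoeffs 1) 1)
          (PySem.List.pySetD (List.replicate ((1:ℤ)).toNat (0:Int)) 0 1) := by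
    unfold eta_power_coeffs
    rw [if_neg (by omega), if_pos (by omega)]
  rw [hshape, show pvEtaCoeffs 1 = [1] from by decide,
      show PySem.List.pySetD (List.replicate ((1:ℤ)).toNat (0:Int)) 0 1 = [1] from by decide]
  exact pvFold1 _

lemma pvBpos1 (power : ℤ) (hp : 0 < power) : eta_power_coeffs_alt 1 power = [1] := by
  have hshape : eta_power_coeffs_alt 1 power
      = (PySem.List.pyRange 1 1 1).foldl
          (fun f n => PySem.List.pySetD f n
            (PySem.Int.floordiv (pvBSum f power n (pvBuildPent 1 1 (((1:ℤ)).toNat+1)) 0) n))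
          (PySem.List.pySetD (List.replicate ((1:ℤ)).toNat (0:Int)) 0 1) := by
    unfold eta_power_coeffs_alt
    rw [if_neg (by omega)]
  rw [hshape, pyRange_one_nil (le_refl 1), List.foldl_nil]
  decide

-- positive power, nmax = 2
lemma pvConv2x (x : ℤ) : pvConvolveInt [1, x] [1, -1] 2 = [1, x - 1] := by
  by_cases hx : x = 0
  · subst hx; decide
  · unfold pvConvolveInt
    rw [show (min (([(1:ℤ), x].length : ℕ):ℤ) 2) = 2 by simp]
    rw [show PySem.List.pyRange 0 2 1 = [0, 1] from by decide]
    simp only [List.foldl_cons, List.foldl_nil]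
    rw [show PySem.List.pyGetD [(1:ℤ), x] 1 0 = x from by
      rw [show (1:ℤ) = ((1:ℕ):ℤ) from by simp, PySem.List.pyGetD_natCast]; rfl]
    rw [if_neg hx]
    rw [PySem.List.pyGetD_zero_cons]
    rw [if_neg (by omega : ¬(1:ℤ) = 0)]
    rw [show List.foldl (fun result j => PySem.List.pySetD result (0 + j)
          (PySem.List.pyGetD result (0 + j) 0 + 1 * PySem.List.pyGetD [1, -1] j 0))
          (List.replicate (Int.toNat 2) 0)
          (PySem.List.pyRange 0 (min (([(1:ℤ), -1].length : ℕ):ℤ) (2 - 0)) 1) = [1, -1] from by decide]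
    rw [show PySem.List.pyRange 0 (min (([(1:ℤ), -1].length : ℕ):ℤ) (2 - 1)) 1 = [0] from by decide]
    rw [List.foldl_cons, List.foldl_nil]
    rw [show PySem.List.pyGetD [(1:ℤ), -1] (1 + 0) 0 = -1 from by decide]
    rw [show PySem.List.pyGetD [(1:ℤ), -1] 0 0 = 1 from by decide]
    rw [show ((1:ℤ) + 0) = ((1:ℕ):ℤ) by simp]
    rw [PySem.List.pySetD_natCast]
    show [1, -1 + x * 1] = [1, x - 1]
    simp only [List.cons.injEq, true_and, and_true]
    ring

lemma pvApos2loop : ∀ t : ℕ,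
    (List.range t).foldl (fun r (_ : ℕ) => pvConvolveInt r [1, -1] 2) [1, 0] = [1, -(t:ℤ)] := by
  intro t
  induction t with
  | zero => norm_num
  | succ t ih =>
    rw [List.range_succ, List.foldl_append, ih, List.foldl_cons, List.foldl_nil, pvConv2x]
    simp only [List.cons.injEq, and_true, true_and]
    push_cast; ring

lemma pvApos2 (power : ℤ) (hp : 0 < power) : eta_power_coeffs 2 power = [1, -power] := by
  have hshape : eta_power_coeffs 2 power
      = (List.range power.toNat).foldl
          (fun result _ => pvConvolveInt result (pvEtaCoeffs 2) 2)
          (PySem.List.pySetD (List.replicate ((2:ℤ)).toNat (0:Int)) 0 1) := by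
    unfold eta_power_coeffs
    rw [if_neg (by omega), if_pos (by omega)]
  rw [hshape, show pvEtaCoeffs 2 = [1, -1] from by decide,
      show PySem.List.pySetD (List.replicate ((2:ℤ)).toNat (0:Int)) 0 1 = [1, 0] from by decide]
  rw [pvApos2loop power.toNat]
  simp only [List.cons.injEq, and_true, true_and]
  rw [Int.toNat_of_nonneg (by omega)]

lemma pvBpos2 (power : ℤ) (hp : 0 < power) : eta_power_coeffs_alt 2 power = [1, -power] := by
  have hshape : eta_power_coeffs_alt 2 power
      = (PySem.List.pyRange 1 2 1).foldl
          (fun f n => PySem.List.pySetD f n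
            (PySem.Int.floordiv (pvBSum f power n (pvBuildPent 2 1 (((2:ℤ)).toNat+1)) 0) n))
          (PySem.List.pySetD (List.replicate ((2:ℤ)).toNat (0:Int)) 0 1) := by
    unfold eta_power_coeffs_alt
    rw [if_neg (by omega)]
  rw [hshape, show pvBuildPent 2 1 (((2:ℤ)).toNat+1) = [(1, -1)] from by decide,
      show PySem.List.pyRange 1 2 1 = [1] from by decide,
      show PySem.List.pySetD (List.replicate ((2:ℤ)).toNat (0:Int)) 0 1 = [1, 0] from by decide,
      List.foldl_cons, List.foldl_nil]
  have hs : pvBSum [1, 0] power 1 [(1, -1)] 0 = -power := by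
    simp only [pvBSum]
    rw [if_neg (by omega : ¬ (1:ℤ) > 1)]
    rw [show PySem.List.pyGetD [(1:ℤ), 0] (1-1) 0 = 1 from by decide]
    ring
  rw [hs, PySem.Int.floordiv_eq_ediv_of_pos (by omega), Int.ediv_one]
  simp [pysem]

-- ===== VERDICT (by name: the statement is the Claim_ definition above) =====
theorem eta_power_coeffs_spec : Claim_equal_eta_power_coeffs := by
  intro nmax power hdom hpre
  obtain ⟨h1, h2⟩ := hpre
  show eta_power_coeffs nmax power = eta_power_coeffs_alt nmax power
  obtain ⟨N, rfl⟩ : ∃ N : ℕ, nmax = (N:ℤ) := ⟨nmax.toNat, by omega⟩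
  have hN : 1 ≤ N := by omega
  rcases lt_trichotomy power 0 with hp | hp | hp
  · rw [pvAneg N hN power hp, pvBalt N hN power hp]
  · subst hp
    have hA : eta_power_coeffs (N:ℤ) 0
        = PySem.List.pySetD (List.replicate ((N:ℤ)).toNat (0:Int)) 0 1 := by
      unfold eta_power_coeffs
      rw [if_pos rfl]
    have hB : eta_power_coeffs_alt (N:ℤ) 0
        = PySem.List.pySetD (List.replicate ((N:ℤ)).toNat (0:Int)) 0 1 := by
      unfold eta_power_coeffs_alt
      rw [if_pos rfl]
    rw [hA, hB]
  · have hle2 : (N:ℤ) ≤ 2 := by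
      rcases h2 with h2 | h2
      · omega
      · exact h2
    have : N = 1 ∨ N = 2 := by omega
    rcases this with rfl | rfl
    · rw [show (((1:ℕ)):ℤ) = (1:ℤ) by simp, pvApos1 power hp, pvBpos1 power hp]
    · rw [show (((2:ℕ)):ℤ) = (2:ℤ) by simp, pvApos2 power hp, pvBpos2 power hp]
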